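-- pv_equiv track=rewrite | github.com/zhaowj1107/CS5001 | HW4/ingredient_scrubber.py | validate_ingredient
-- ===== SOURCE A (Python) =====
-- def validate_ingredient(ingredient: str):
--     """
--     function name: validate_unit
--     Checks if the unit is valid and converts plural units to singular
--     >>> validate_ingredient("of flour")
--     'flour'
--     >>> validate_ingredient("peppersss")
--     'Invalid Ingredient'
--     >>> validate_ingredient("and baking soda")
--     'baking soda'
--     >>> validate_ingredient("in baking soda")
--     'baking soda'
--     >>> validate_ingredient("with baking soda")
--     'baking soda'
--     >>> validate_ingredient("of wa1ter")
--     'Invalid Ingredient'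
--     >>> validate_ingredient("of_water")
--     'Invalid Ingredient'
--     """
--     conn_words = ["of ", "and ", "with ", "in "]
--     for word in conn_words:
--         if ingredient.find(word) != -1:
--             ingredient = ingredient.replace(word, "")
--     ingredient_clean = ingredient.rstrip()
--     if not (ingredient_clean.replace(" ", "").isalpha()):
--         return "Invalid Ingredient"
--     else:
--         for letter in range(len(ingredient_clean) - 2):
--             if ingredient_clean[letter] == ingredient_clean[letter + 1] == ingredient_clean[letter + 2]:
--                 return "Invalid Ingredient"
--         return ingredient_clean
--     pass
-- ===== SOURCE B (Python) =====
-- def _ok(chars):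
--     """Single fused pass: charset check, letter presence and triple-run
--     detection via a run-length counter."""
--     prev = None
--     run = 0
--     has_letter = False
--     for ch in chars:
--         if not (ch.isalpha() or ch == " "):
--             return False
--         has_letter = has_letter or ch.isalpha()
--         if ch == prev:
--             run += 1
--             if run == 3:
--                 return False
--         else:
--             prev = ch
--             run = 1
--     return has_letter
--
--
-- def validate_ingredient(ingredient: str):
--     for word in ["of ", "and ", "with ", "in "]:
--         ingredient = ingredient.replace(word, "")
--     ingredient_clean = ingredient.rstrip()
--     return ingredient_clean if _ok(ingredient_clean) else "Invalid Ingredient"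
-- ===== Notes on version B (the rewrite author's own statement) =====
-- stated objective: alternative
-- what changed: The three separate validation passes (replace-spaces + isalpha scan, then an index-based window loop comparing clean[i], clean[i+1], clean[i+2]) are fused into one single pass over the characters that maintains a run-length counter of consecutive equal characters plus a has-letter flag; the connector-word replace loop drops A's redundant find() guard.
import Mathlib
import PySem

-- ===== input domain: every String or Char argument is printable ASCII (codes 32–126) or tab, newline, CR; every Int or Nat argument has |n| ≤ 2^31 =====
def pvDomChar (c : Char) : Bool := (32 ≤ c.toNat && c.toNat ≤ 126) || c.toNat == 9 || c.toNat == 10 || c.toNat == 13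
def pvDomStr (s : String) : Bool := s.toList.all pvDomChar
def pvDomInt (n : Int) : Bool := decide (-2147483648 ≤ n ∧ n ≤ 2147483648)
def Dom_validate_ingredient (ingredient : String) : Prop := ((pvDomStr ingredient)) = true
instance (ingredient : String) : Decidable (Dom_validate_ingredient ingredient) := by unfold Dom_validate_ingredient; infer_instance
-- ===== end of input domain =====

-- B fuses A's three validation passes (space-removal + isalpha check, then an index-window
-- triple scan) into one single pass with a run-length counter; same O(n) cost (objective: alternative).


-- ===== PORT A =====
-- range(len(clean)-2): Nat truncated subtraction gives the same empty range as Python's negative range bound;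
-- every index the loop visits is in range, so List.getD is exact for clean[letter].
def validate_ingredient (ingredient : String) : String :=
  let ing := ["of ", "and ", "with ", "in "].foldl
    (fun s w => if PySem.Str.find s w ≠ -1 then PySem.Str.replace s w "" else s) ingredient
  let clean := PySem.Str.rstrip ing
  if !(PySem.Str.strIsalpha (PySem.Str.replace clean " " "")) then "Invalid Ingredient"
  else if (List.range (clean.toList.length - 2)).any (fun i =>
      (clean.toList.getD i ' ' == clean.toList.getD (i+1) ' ') &&
      (clean.toList.getD (i+1) ' ' == clean.toList.getD (i+2) ' ')) then "Invalid Ingredient"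
  else clean

-- ===== PORT B =====
-- transliteration of Source B's _ok: one pass with (prev, run-length, has-letter) state; an early 'return False' becomes the value false
def altOk : List Char → Option Char → Nat → Bool → Bool
  | [], _, _, has_letter => has_letter
  | ch :: rest, prev, run, has_letter =>
    if !(PySem.Chars.isalpha ch || ch == ' ') then false
    else
      let hl := has_letter || PySem.Chars.isalpha ch
      if some ch == prev then
        if run + 1 == 3 then false else altOk rest prev (run + 1) hl
      else altOk rest (some ch) 1 hl

def validate_ingredient_alt (ingredient : String) : String :=
  let ing := ["of ", "and ", "with ", "in "].foldl (fun s w => PySem.Str.replace s w "") ingredient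
  let clean := PySem.Str.rstrip ing
  if altOk clean.toList none 0 false then clean else "Invalid Ingredient"

-- ===== PRECONDITION & SPEC =====
def Spec_validate_ingredient (ingredient : String) (out : String) : Prop := out = validate_ingredient_alt ingredient
instance (ingredient : String) (out : String) : Decidable (Spec_validate_ingredient ingredient out) := by unfold Spec_validate_ingredient; infer_instance

-- ===== CLAIM (what is proved, stated in full; the proofs are below) =====
def Claim_equal_validate_ingredient : Prop := ∀ (ingredient : String), Dom_validate_ingredient ingredient → Spec_validate_ingredient ingredient (validate_ingredient ingredient)

-- ===== LEMMAS AND PROOFS =====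

-- structural form of "some window of three consecutive equal characters exists"
def hasTriple : List Char → Bool
  | a :: b :: c :: t => (a == b && b == c) || hasTriple (b :: c :: t)
  | _ => false

-- replace is the identity when the pattern does not occur (A's find-guard is redundant)
theorem go_noop (old new : List Char) :
    ∀ (fuel : Nat) (l acc : List Char), l.length ≤ fuel → (∀ j, ¬ old <+: l.drop j) →
      PySem.Chars.replace.go old new fuel l acc = acc.reverse ++ l := by
  intro fuel
  induction fuel with
  | zero =>
    intro l acc hlen _
    have : l = [] := List.eq_nil_of_length_eq_zero (Nat.le_zero.mp hlen)
    subst this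
    simp [PySem.Chars.replace.go]
  | succ n ih =>
    intro l acc hlen hpre
    cases l with
    | nil => simp [PySem.Chars.replace.go]
    | cons c t =>
      have h0 : ¬ old <+: (c :: t) := by simpa using hpre 0
      have hp : old.isPrefixOf (c :: t) = false := by
        rw [Bool.eq_false_iff]
        intro hx
        exact h0 (List.isPrefixOf_iff_prefix.mp hx)
      rw [PySem.Chars.replace.go, hp]
      simp only [Bool.false_eq_true, if_false]
      rw [ih t (c :: acc) (by simpa using Nat.lt_succ_iff.mp (by simpa using hlen))
        (fun j => by simpa using hpre (j+1))]
      simp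

theorem replace_noop (s w : List Char) (hw : ¬ w.isEmpty = true) (h : ¬ w <:+: s) :
    PySem.Chars.replace s w [] = s := by
  rw [PySem.Chars.replace, if_neg hw, go_noop]
  · simp
  · simp
  · intro j hj
    exact h (List.IsPrefix.isInfix hj |>.trans (List.drop_suffix _ _).isInfix)

theorem step_eq (s w : String) (hw : ¬ w.toList.isEmpty = true) :
    (if PySem.Str.find s w ≠ -1 then PySem.Str.replace s w "" else s) = PySem.Str.replace s w "" := by
  by_cases hf : PySem.Str.find s w = -1
  · have hinf : ¬ w.toList <:+: s.toList :=
      ((PySem.Chars.find_eq_neg_one_iff _ _).mp (by simpa using hf))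
    simp only [hf, ne_eq, not_true_eq_false, if_false]
    apply String.toList_inj.mp
    rw [PySem.Str.toList_replace]
    exact (replace_noop _ _ hw hinf).symm
  · have : PySem.Chars.find s.toList w.toList ≠ -1 := by simpa using hf
    simp [this]

theorem fold_eq (s : String) :
    ["of ", "and ", "with ", "in "].foldl
        (fun s w => if PySem.Str.find s w ≠ -1 then PySem.Str.replace s w "" else s) s
      = ["of ", "and ", "with ", "in "].foldl (fun s w => PySem.Str.replace s w "") s := by
  simp only [List.foldl_cons, List.foldl_nil]
  rw [step_eq _ _ (by decide), step_eq _ _ (by decide), step_eq _ _ (by decide),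
    step_eq _ _ (by decide)]

-- replacing " " by "" is removing the spaces
theorem go_space :
    ∀ (fuel : Nat) (l acc : List Char), l.length ≤ fuel →
      PySem.Chars.replace.go [' '] [] fuel l acc = acc.reverse ++ l.filter (fun c => !(c == ' ')) := by
  intro fuel
  induction fuel with
  | zero =>
    intro l acc hlen
    have : l = [] := List.eq_nil_of_length_eq_zero (Nat.le_zero.mp hlen)
    subst this
    simp [PySem.Chars.replace.go]
  | succ n ih =>
    intro l acc hlen
    cases l with
    | nil => simp [PySem.Chars.replace.go]
    | cons c t =>
      have ht : t.length ≤ n := Nat.lt_succ_iff.mp (by simpa using hlen)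
      by_cases hc : c = ' '
      · subst hc
        have hp : [' '].isPrefixOf (' ' :: t) = true := by
          simp [List.isPrefixOf_iff_prefix]
        rw [PySem.Chars.replace.go, hp]
        simp only [if_true]
        rw [ih _ _ (by simpa using ht)]
        simp
      · have hp : [' '].isPrefixOf (c :: t) = false := by
          rw [Bool.eq_false_iff]
          intro hx
          rcases List.cons_prefix_cons.mp (List.isPrefixOf_iff_prefix.mp hx) with ⟨h1, -⟩
          exact hc h1.symm
        rw [PySem.Chars.replace.go, hp]
        simp only [Bool.false_eq_true, if_false]
        rw [ih _ _ ht]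
        simp [hc]

theorem replace_space (s : List Char) :
    PySem.Chars.replace s [' '] [] = s.filter (fun c => !(c == ' ')) := by
  rw [PySem.Chars.replace, if_neg (by simp), go_space s.length s [] le_rfl]
  simp

theorem isalpha_space : PySem.Chars.isalpha ' ' = false := by decide

theorem all_filter (cs : List Char) :
    (cs.filter (fun c => !(c == ' '))).all PySem.Chars.isalpha =
      cs.all (fun c => PySem.Chars.isalpha c || c == ' ') := by
  induction cs with
  | nil => rfl
  | cons c t ih =>
    by_cases hc : c = ' '
    · subst hc; simp [List.filter_cons, ih]
    · simp [List.filter_cons, beq_iff_eq, hc, ih, beq_eq_false_iff_ne.mpr hc]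

-- A's "compact is alpha" test = "every char is a letter or a space, and some letter exists"
theorem strIsalpha_filter (cs : List Char) :
    PySem.Chars.strIsalpha (cs.filter (fun c => !(c == ' '))) =
      (cs.all (fun c => PySem.Chars.isalpha c || c == ' ') && cs.any PySem.Chars.isalpha) := by
  induction cs with
  | nil => simp [PySem.Chars.strIsalpha]
  | cons c t ih =>
    by_cases hc : c = ' '
    · subst hc
      simpa [PySem.Chars.strIsalpha, List.filter_cons, isalpha_space] using ih
    · by_cases ha : PySem.Chars.isalpha c = true
      · simp [PySem.Chars.strIsalpha, List.filter_cons, beq_iff_eq, hc, ha, all_filter,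
          Bool.or_comm]
      · simp [PySem.Chars.strIsalpha, List.filter_cons, beq_iff_eq, hc,
          Bool.eq_false_iff.mpr ha]

theorem hasTriple_ne {p c : Char} (t : List Char) (h : ¬ p = c) :
    hasTriple (p :: c :: t) = hasTriple (c :: t) := by
  cases t with
  | nil => simp [hasTriple]
  | cons d t' => simp [hasTriple, h]

-- A's index-window loop = hasTriple
theorem range_any_eq_hasTriple : ∀ cs : List Char,
    ((List.range (cs.length - 2)).any fun i =>
      (cs.getD i ' ' == cs.getD (i+1) ' ') && (cs.getD (i+1) ' ' == cs.getD (i+2) ' ')) = hasTriple cs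
  | [] => by simp [hasTriple]
  | [a] => by simp [hasTriple]
  | [a, b] => by simp [hasTriple]
  | a :: b :: c :: t => by
    have IH := range_any_eq_hasTriple (b :: c :: t)
    simp only [List.length_cons] at *
    have hlen : t.length + 1 + 1 + 1 - 2 = (t.length + 1 + 1 - 2) + 1 := by omega
    rw [hlen, List.range_succ_eq_map]
    simp only [List.any_cons, List.any_map, Function.comp_def, List.getD_cons_succ,
      List.getD_cons_zero] at IH ⊢
    rw [IH]
    conv_rhs => rw [hasTriple]

-- run-length invariant of B's single pass (run = 1 and run = 2 states)
theorem altOk_run (cs : List Char) : ∀ (p : Char) (hl : Bool),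
    (altOk cs (some p) 1 hl =
      ((cs.all (fun c => PySem.Chars.isalpha c || c == ' ') && (hl || cs.any PySem.Chars.isalpha)) && !hasTriple (p :: cs))) ∧
    (altOk cs (some p) 2 hl =
      ((cs.all (fun c => PySem.Chars.isalpha c || c == ' ') && (hl || cs.any PySem.Chars.isalpha)) && !hasTriple (p :: p :: cs))) := by
  induction cs with
  | nil =>
    intro p hl
    constructor <;> simp [altOk, hasTriple]
  | cons c t ih =>
    intro p hl
    by_cases hok : (PySem.Chars.isalpha c || c == ' ') = true
    · by_cases hcp : c = p
      · subst hcp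
        constructor
        · rw [altOk]
          simp only [hok, Bool.not_true, Bool.false_eq_true, if_false,
            beq_self_eq_true, if_true, show (1 + 1 == 3) = false from rfl]
          rw [(ih c (hl || PySem.Chars.isalpha c)).2]
          rw [Bool.eq_iff_iff]
          simp [hok]
          tauto
        · rw [altOk]
          simp only [hok, Bool.not_true, Bool.false_eq_true, if_false,
            beq_self_eq_true, if_true, show (2 + 1 == 3) = true from rfl]
          simp [hasTriple]
      · have hne : (some c == some p) = false := by
          simp [hcp]
        constructor
        · rw [altOk]
          simp only [hok, Bool.not_true, Bool.false_eq_true, if_false, hne]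
          rw [(ih c (hl || PySem.Chars.isalpha c)).1, hasTriple_ne t (fun h => hcp h.symm)]
          rw [Bool.eq_iff_iff]
          simp [hok]
          tauto
        · rw [altOk]
          simp only [hok, Bool.not_true, Bool.false_eq_true, if_false, hne]
          rw [(ih c (hl || PySem.Chars.isalpha c)).1]
          have h3 : hasTriple (p :: p :: c :: t) = hasTriple (c :: t) := by
            rw [show hasTriple (p :: p :: c :: t) = ((p == p && p == c) || hasTriple (p :: c :: t)) from rfl,
              hasTriple_ne t (fun h => hcp h.symm)]
            simp [beq_eq_false_iff_ne.mpr (fun h => hcp (Eq.symm h))]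
          rw [h3, Bool.eq_iff_iff]
          simp [hok]
          tauto
    · have hok' : (!(PySem.Chars.isalpha c || c == ' ')) = true := by
        simp [Bool.eq_false_iff.mpr hok]
      constructor <;>
      · rw [altOk]
        simp only [hok', if_true]
        rw [Bool.eq_iff_iff]
        simp [Bool.eq_false_iff.mpr hok]

theorem altOk_top (cs : List Char) :
    altOk cs none 0 false =
      ((cs.all (fun c => PySem.Chars.isalpha c || c == ' ') && cs.any PySem.Chars.isalpha) && !hasTriple cs) := by
  cases cs with
  | nil => simp [altOk]
  | cons c t =>
    by_cases hok : (PySem.Chars.isalpha c || c == ' ') = true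
    · rw [altOk]
      simp only [hok, Bool.not_true, Bool.false_eq_true, if_false,
        show (some c == (none : Option Char)) = false from rfl]
      rw [(altOk_run t c (false || PySem.Chars.isalpha c)).1]
      rw [Bool.eq_iff_iff]
      simp [hok]
    · have hok' : (!(PySem.Chars.isalpha c || c == ' ')) = true := by
        simp [Bool.eq_false_iff.mpr hok]
      rw [altOk]
      simp [hok', Bool.eq_false_iff.mpr hok]

-- ===== VERDICT (by name: the statement is the Claim_ definition above) =====
theorem validate_ingredient_spec : Claim_equal_validate_ingredient := by
  intro ingredient _
  show validate_ingredient ingredient = validate_ingredient_alt ingredient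
  simp only [validate_ingredient, validate_ingredient_alt]
  rw [fold_eq]
  set clean := PySem.Str.rstrip (["of ", "and ", "with ", "in "].foldl
    (fun s w => PySem.Str.replace s w "") ingredient) with hclean
  have h1 : PySem.Str.strIsalpha (PySem.Str.replace clean " " "") =
      (clean.toList.all (fun c => PySem.Chars.isalpha c || c == ' ') &&
        clean.toList.any PySem.Chars.isalpha) := by
    rw [PySem.Str.strIsalpha_eq, PySem.Str.toList_replace]
    simp only [show (" " : String).toList = [' '] from rfl, show ("" : String).toList = [] from rfl]
    rw [replace_space, strIsalpha_filter]
  rw [h1, range_any_eq_hasTriple clean.toList, altOk_top clean.toList]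
  cases hab : (clean.toList.all (fun c => PySem.Chars.isalpha c || c == ' ') &&
      clean.toList.any PySem.Chars.isalpha) <;>
    cases hc : hasTriple clean.toList <;> simp
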